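-- pv_equiv track=rewrite | github.com/tuannguyentpd/yolo_monkey | Final/Sources/web/darknet.py | getColorBox
-- ===== SOURCE A (Python) =====
-- MAIN_COLORS = [(0,255,0),(255,0,0),(0,255,255),(255,255,0),(0,0,255),(255,0,255),(192,192,192),(128,128,128),(0,0,128),(0,128,128),(0,128,0),(128,0,128),(128,128,0),(128,0,0)]
--
-- def getColorBox(r):
--     colorObjects = {}
--     index_color = 0
--     for i in range(0,len(r)):
--         if r[i][0] not in colorObjects.keys():
--             colorObjects.update({r[i][0]: MAIN_COLORS[index_color]})
--             index_color = index_color + 1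
--     return colorObjects
-- ===== SOURCE B (Python) =====
-- MAIN_COLORS = [(0,255,0),(255,0,0),(0,255,255),(255,255,0),(0,0,255),(255,0,255),(192,192,192),(128,128,128),(0,0,128),(0,128,128),(0,128,0),(128,0,128),(128,128,0),(128,0,0)]
--
-- def getColorBox(r):
--     # Stateless prefix formulation: an entry exists at index i exactly when its key
--     # first occurs there, and its color index is the number of distinct keys seen
--     # strictly before i -- no threaded dict/counter state at all.
--     heads = [x[0] for x in r]
--     return {heads[i]: MAIN_COLORS[len(set(heads[:i]))]
--             for i in range(len(heads)) if heads[i] not in heads[:i]}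
-- ===== Notes on version B (the rewrite author's own statement) =====
-- stated objective: alternative
-- what changed: Replaces A's single loop threading a dict and a running color counter by a stateless comprehension: for each index i that is a first occurrence of its key, the color index is recomputed from scratch as the cardinality of the set of keys in the strict prefix r[:i], so no state is carried between iterations.
import Mathlib
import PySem

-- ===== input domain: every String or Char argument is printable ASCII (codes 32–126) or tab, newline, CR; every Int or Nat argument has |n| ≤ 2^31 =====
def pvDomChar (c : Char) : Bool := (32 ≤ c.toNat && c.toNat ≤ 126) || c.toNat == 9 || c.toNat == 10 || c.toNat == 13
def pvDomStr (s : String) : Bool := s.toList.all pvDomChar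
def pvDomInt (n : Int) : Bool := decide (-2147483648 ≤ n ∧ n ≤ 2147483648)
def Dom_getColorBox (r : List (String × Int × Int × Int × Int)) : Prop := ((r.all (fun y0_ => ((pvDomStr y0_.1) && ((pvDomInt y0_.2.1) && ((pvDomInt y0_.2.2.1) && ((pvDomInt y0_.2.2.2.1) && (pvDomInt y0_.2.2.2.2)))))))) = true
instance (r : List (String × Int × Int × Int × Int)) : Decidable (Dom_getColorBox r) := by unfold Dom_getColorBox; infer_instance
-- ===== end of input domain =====

-- B drops A's threaded dict-and-counter state: each first-occurrence index gets its color
-- by recomputing the distinct-key count of its strict prefix (objective: alternative).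

def pvMainColors : List (Int × Int × Int) :=
  [(0,255,0),(255,0,0),(0,255,255),(255,255,0),(0,0,255),(255,0,255),(192,192,192),
   (128,128,128),(0,0,128),(0,128,128),(0,128,0),(128,0,128),(128,128,0),(128,0,0)]

-- ===== PORT A =====
-- literal port of A's loop: a dict plus a running color index; MAIN_COLORS[index_color]
-- is ported with pyGetD (Pre_ excludes the inputs where Python's indexing raises).
def getColorBox (r : List (String × Int × Int × Int × Int)) : List (String × Int × Int × Int) :=
  (r.foldl
    (fun (st : PySem.Dict String (Int × Int × Int) × Int) x =>
      if st.1.contains x.1 then st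
      else (st.1.insert x.1 (PySem.List.pyGetD pvMainColors st.2 (0,0,0)), st.2 + 1))
    (PySem.Dict.mk [], 0)).1.items

-- ===== PORT B =====
-- heads[i] with 0 ≤ i < len is ported with getD, heads[:i] with 0 ≤ i is List.take i
-- (PySem.List.slice_to); the comprehension's keys are pairwise distinct (each index kept is
-- the FIRST occurrence of its key), so the resulting dict is exactly this list of pairs.
def getColorBox_alt (r : List (String × Int × Int × Int × Int)) : List (String × Int × Int × Int) :=
  let heads := r.map (·.1)
  ((List.range heads.length).filter
      (fun i => !((heads.take i).contains (heads.getD i "")))).map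
    (fun i => (heads.getD i "",
      PySem.List.pyGetD pvMainColors ((PySem.Set.ofList (heads.take i)).length : Int) (0,0,0)))

-- ===== PRECONDITION & SPEC =====
-- Pre_ excludes exactly the inputs with more than 14 distinct first elements, on which
-- Python A (and B) raises IndexError (MAIN_COLORS has 14 entries).
def Pre_getColorBox (r : List (String × Int × Int × Int × Int)) : Prop :=
  (PySem.List.dedup (r.map (·.1))).length ≤ 14
instance (r : List (String × Int × Int × Int × Int)) : Decidable (Pre_getColorBox r) := by
  unfold Pre_getColorBox; infer_instance

def pvWitness_getColorBox : (List (String × Int × Int × Int × Int)) :=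
  [("cat", 1, 2, 3, 4), ("dog", 5, 6, 7, 8), ("cat", 9, 1, 1, 1)]

def Spec_getColorBox (r : List (String × Int × Int × Int × Int)) (out : List (String × Int × Int × Int)) : Prop := out = getColorBox_alt r
instance (r : List (String × Int × Int × Int × Int)) (out : List (String × Int × Int × Int)) : Decidable (Spec_getColorBox r out) := by unfold Spec_getColorBox; infer_instance

-- ===== CLAIM (what is proved, stated in full; the proofs are below) =====
def Claim_equal_getColorBox : Prop := ∀ (r : List (String × Int × Int × Int × Int)), Dom_getColorBox r → Pre_getColorBox r → Spec_getColorBox r (getColorBox r)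

-- ===== LEMMAS AND PROOFS =====

-- the entry assigned to a key with color index i
def pvEntry (p : String × Nat) : String × Int × Int × Int :=
  (p.1, PySem.List.pyGetD pvMainColors (p.2 : Int) (0,0,0))

-- common recursive middle form: seen-set S, remaining keys l
def pvB (S : List String) : List String → List (String × Int × Int × Int)
  | [] => []
  | h :: t => if h ∈ S then pvB S t else pvEntry (h, S.length) :: pvB (S ++ [h]) t

theorem pvContains_mk_zipIdx (S : List String) (k : String) :
    (PySem.Dict.mk (S.zipIdx.map pvEntry)).contains k = S.any (fun a => a == k) := by
  rw [PySem.Dict.contains_mk, List.any_map]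
  have h : ((S.zipIdx.map Prod.fst).any fun a => a == k) = S.any (fun a => a == k) := by
    rw [List.zipIdx_map_fst]
  rw [← h, List.any_map]
  rfl

-- A-side loop invariant: starting from the dict built from the nodup key list S (with index
-- S.length), A's fold over l lands on the dict built from S updated with l's first elements.
theorem pvLoop (l : List (String × Int × Int × Int × Int)) (S : List String) (hS : S.Nodup) :
    l.foldl
      (fun (st : PySem.Dict String (Int × Int × Int) × Int) x =>
        if st.1.contains x.1 then st
        else (st.1.insert x.1 (PySem.List.pyGetD pvMainColors st.2 (0,0,0)), st.2 + 1))
      (PySem.Dict.mk (S.zipIdx.map pvEntry), (S.length : Int)) =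
    (PySem.Dict.mk ((PySem.Set.update S (l.map (·.1))).zipIdx.map pvEntry),
     ((PySem.Set.update S (l.map (·.1))).length : Int)) := by
  induction l generalizing S with
  | nil => simp [PySem.Set.update]
  | cons x t ih =>
    simp only [List.foldl_cons, List.map_cons, PySem.Set.update_cons]
    by_cases hx : x.1 ∈ S
    · have hc : (PySem.Dict.mk (S.zipIdx.map pvEntry)).contains x.1 = true := by
        rw [pvContains_mk_zipIdx]
        simp [List.any_eq_true]
        exact hx
      have hadd : PySem.Set.add S x.1 = S := by simp [PySem.Set.add, hx]
      rw [hc]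
      simp only [hadd]
      exact ih S hS
    · have hc : (PySem.Dict.mk (S.zipIdx.map pvEntry)).contains x.1 = false := by
        rw [pvContains_mk_zipIdx]
        simp
        intro a ha h
        exact hx (h ▸ ha)
      have hadd : PySem.Set.add S x.1 = S ++ [x.1] := by simp [PySem.Set.add, hx]
      rw [hc]
      simp only [Bool.false_eq_true, if_false, hadd]
      have hins : (PySem.Dict.mk (S.zipIdx.map pvEntry)).insert x.1
            (PySem.List.pyGetD pvMainColors (S.length : Int) (0,0,0)) =
          PySem.Dict.mk ((S ++ [x.1]).zipIdx.map pvEntry) := by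
        apply PySem.Dict.ext
        rw [PySem.Dict.items_insert_of_not_contains _ _ hc]
        have : (S ++ [x.1]).zipIdx = S.zipIdx ++ [(x.1, S.length)] := by
          rw [List.zipIdx_append]; simp [List.zipIdx]
        simp [this, pvEntry]
      rw [hins]
      have hlen : ((S.length : Int) + 1) = (((S ++ [x.1]).length : Nat) : Int) := by
        simp
      rw [hlen]
      exact ih (S ++ [x.1]) (by
        simp [List.nodup_append, hS]
        intro a ha h
        exact hx (h ▸ ha))

-- A-side result characterised through pvB: the zipIdx entries of Set.update S l extend
-- those of S by exactly pvB S l.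
theorem pvUpdate_eq_pvB (l S : List String) :
    ((PySem.Set.update S l).zipIdx.map pvEntry) = S.zipIdx.map pvEntry ++ pvB S l := by
  induction l generalizing S with
  | nil => simp [PySem.Set.update, pvB]
  | cons h t ih =>
    rw [PySem.Set.update_cons, pvB]
    by_cases hh : h ∈ S
    · have : PySem.Set.add S h = S := by simp [PySem.Set.add, hh]
      rw [this, if_pos hh]
      exact ih S
    · have : PySem.Set.add S h = S ++ [h] := by simp [PySem.Set.add, hh]
      rw [this, if_neg hh, ih (S ++ [h])]
      have hz : (S ++ [h]).zipIdx = S.zipIdx ++ [(h, S.length)] := by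
        rw [List.zipIdx_append]; simp [List.zipIdx]
      simp [hz]

-- B-side: the range/filter/map comprehension over h :: t, restricted to a prefix P,
-- collapses to pvB on the deduplicated prefix.
theorem pvRange_eq_pvB (l P : List String) :
    (((List.range l.length).filter
        (fun i => !(((P ++ l.take i)).contains (l.getD i "")))).map
      (fun i => (l.getD i "",
        PySem.List.pyGetD pvMainColors ((PySem.Set.ofList (P ++ l.take i)).length : Int) (0,0,0))))
    = pvB (PySem.Set.ofList P) l := by
  induction l generalizing P with
  | nil => simp [pvB]
  | cons h t ih =>
    have hrange : List.range (h :: t).length = 0 :: (List.range t.length).map (· + 1) := by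
      simp [List.range_succ_eq_map]
    rw [hrange, List.filter_cons]
    have hshift : ∀ i : Nat, ((h :: t).take (i + 1)) = h :: t.take i := by intro i; rfl
    by_cases hh : h ∈ P
    · have hc : (!((P ++ (h :: t).take 0).contains ((h :: t).getD 0 ""))) = false := by
        simp [hh]
      rw [hc]
      have hmem : h ∈ PySem.Set.ofList P := by
        rw [PySem.Set.mem_ofList]; exact hh
      have hPh : PySem.Set.ofList (P ++ [h]) = PySem.Set.ofList P := by
        rw [PySem.Set.ofList_append]
        simp [PySem.Set.update, PySem.Set.add, hmem, List.foldl]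
      have hI := ih (P ++ [h])
      simp only [Bool.false_eq_true, if_false, List.filter_map, List.map_map,
        Function.comp_def, hshift, List.getD_cons_succ] at hI ⊢
      simp only [List.append_assoc, List.singleton_append] at hI
      rw [hI, hPh, pvB, if_pos hmem]
    · have hc : (!((P ++ (h :: t).take 0).contains ((h :: t).getD 0 ""))) = true := by
        simp [hh]
      rw [hc, if_pos rfl]
      have hmem : h ∉ PySem.Set.ofList P := by
        rw [PySem.Set.mem_ofList]; exact hh
      have hPh : PySem.Set.ofList (P ++ [h]) = PySem.Set.ofList P ++ [h] := by
        rw [PySem.Set.ofList_append]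
        simp [PySem.Set.update, PySem.Set.add, hmem, List.foldl]
      have hI := ih (P ++ [h])
      simp only [List.filter_map, List.map_map, List.map_cons, Function.comp_def,
        hshift, List.getD_cons_succ, List.getD_cons_zero, List.take_zero,
        List.append_nil] at hI ⊢
      simp only [List.append_assoc, List.singleton_append] at hI
      rw [hI, hPh, pvB, if_neg hmem, pvEntry]

-- ===== VERDICT (by name: the statement is the Claim_ definition above) =====
theorem getColorBox_spec : Claim_equal_getColorBox := by
  intro r _ _
  unfold Spec_getColorBox getColorBox getColorBox_alt
  have hA := pvLoop r [] List.nodup_nil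
  simp only [List.zipIdx_nil, List.map_nil, List.length_nil, Nat.cast_zero] at hA
  rw [hA]
  have hB := pvRange_eq_pvB (r.map (·.1)) []
  simp only [List.nil_append] at hB
  rw [pvUpdate_eq_pvB]
  simp only [List.zipIdx_nil, List.map_nil, List.nil_append]
  exact hB.symm
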